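-- pv_equiv track=rewrite | github.com/The-OpenROAD-Project/OpenROAD | test/orfs/mock-array/compare_interfaces.py | compare_modules
-- ===== SOURCE A (Python) =====
-- def compare_modules(sv_ports, chisel_ports, module_name):
--     """Compare two normalized port dicts. Returns list of error strings."""
--     errors = []
--     sv_names = set(sv_ports.keys())
--     ch_names = set(chisel_ports.keys())
--
--     # The SV version adds a reset port that the Chisel version omits
--     # (Chisel's implicit reset is not exposed as an explicit port).
--     only_sv = sv_names - ch_names - {"reset"}
--     only_ch = ch_names - sv_names
--     if only_sv:
--         errors.append(f"{module_name}: ports only in SV: {sorted(only_sv)}")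
--     if only_ch:
--         errors.append(f"{module_name}: ports only in Chisel: " f"{sorted(only_ch)}")
--
--     for name in sorted(sv_names & ch_names):
--         sv_dir, sv_bits = sv_ports[name]
--         ch_dir, ch_bits = chisel_ports[name]
--         if sv_dir != ch_dir:
--             errors.append(
--                 f"{module_name}.{name}: direction " f"SV={sv_dir} Chisel={ch_dir}"
--             )
--         if sv_bits != ch_bits:
--             # Chisel removes unused io_lsbIns[0], so
--             # SV has COLS bits vs Chisel's COLS-1.
--             if name == "io_lsbIns" and sv_bits == ch_bits + 1:
--                 continue
--             errors.append(
--                 f"{module_name}.{name}: " f"width SV={sv_bits} Chisel={ch_bits}"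
--             )
--
--     return errors
-- ===== SOURCE B (Python) =====
-- def compare_modules(sv_ports, chisel_ports, module_name):
--     """Compare two normalized port dicts. Returns list of error strings."""
--     only_sv, only_ch, detail = [], [], []
--     for name in sorted(set(sv_ports) | set(chisel_ports)):
--         sv, ch = sv_ports.get(name), chisel_ports.get(name)
--         if ch is None:
--             if name != "reset":
--                 only_sv.append(name)
--         elif sv is None:
--             only_ch.append(name)
--         else:
--             (sv_dir, sv_bits), (ch_dir, ch_bits) = sv, ch
--             if sv_dir != ch_dir:
--                 detail.append(
--                     f"{module_name}.{name}: direction SV={sv_dir} Chisel={ch_dir}"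
--                 )
--             if sv_bits != ch_bits and not (
--                 name == "io_lsbIns" and sv_bits == ch_bits + 1
--             ):
--                 detail.append(
--                     f"{module_name}.{name}: width SV={sv_bits} Chisel={ch_bits}"
--                 )
--     errors = []
--     if only_sv:
--         errors.append(f"{module_name}: ports only in SV: {only_sv}")
--     if only_ch:
--         errors.append(f"{module_name}: ports only in Chisel: {only_ch}")
--     return errors + detail
-- ===== Notes on version B (the rewrite author's own statement) =====
-- stated objective: alternative
-- what changed: Replaces the three set-algebra differences plus a separate sorted-intersection loop by a single pass over the sorted union of port names that classifies each name (SV-only / Chisel-only / compare directions and widths) and assembles the same messages afterwards.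
import Mathlib
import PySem

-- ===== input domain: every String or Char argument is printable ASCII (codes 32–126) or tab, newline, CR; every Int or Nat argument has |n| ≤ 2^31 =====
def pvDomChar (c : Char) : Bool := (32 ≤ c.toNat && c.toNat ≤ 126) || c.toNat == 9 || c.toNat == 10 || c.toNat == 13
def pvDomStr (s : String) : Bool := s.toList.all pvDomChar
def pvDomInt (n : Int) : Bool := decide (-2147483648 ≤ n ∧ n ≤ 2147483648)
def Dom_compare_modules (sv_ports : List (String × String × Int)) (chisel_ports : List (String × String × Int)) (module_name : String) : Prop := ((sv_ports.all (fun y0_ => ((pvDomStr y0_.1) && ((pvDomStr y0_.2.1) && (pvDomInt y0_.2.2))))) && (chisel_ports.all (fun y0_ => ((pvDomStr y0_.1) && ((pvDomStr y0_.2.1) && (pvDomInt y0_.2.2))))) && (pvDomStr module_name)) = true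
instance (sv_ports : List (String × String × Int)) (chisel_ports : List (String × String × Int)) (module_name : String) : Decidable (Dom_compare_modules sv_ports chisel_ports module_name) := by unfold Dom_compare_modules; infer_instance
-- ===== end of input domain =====

-- B replaces A's set-algebra differences + separate sorted-intersection loop by one
-- classifying pass over the sorted union of names (objective: alternative decomposition).

-- Shared f-string helpers: Python's repr of a str, exact on the Dom character set
-- (printable ASCII + tab/newline/CR), and str() of a list of strs.
def pyReprChar (q : Char) (c : Char) : List Char :=
  if c = '\\' then ['\\', '\\']
  else if c = q then ['\\', q]
  else if c = '\t' then ['\\', 't']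
  else if c = '\n' then ['\\', 'n']
  else if c = '\r' then ['\\', 'r']
  else [c]

def pyRepr (s : String) : String :=
  let cs := s.toList
  let q : Char := if cs.contains '\'' && !(cs.contains '"') then '"' else '\''
  String.ofList ([q] ++ cs.flatMap (pyReprChar q) ++ [q])

def pyStrList (xs : List String) : String :=
  "[" ++ PySem.Str.join ", " (xs.map pyRepr) ++ "]"

def msgOnlySV (m : String) (xs : List String) : String :=
  m ++ ": ports only in SV: " ++ pyStrList xs

def msgOnlyCh (m : String) (xs : List String) : String :=
  m ++ ": ports only in Chisel: " ++ pyStrList xs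

def msgDir (m name d1 d2 : String) : String :=
  m ++ "." ++ name ++ ": direction SV=" ++ d1 ++ " Chisel=" ++ d2

def msgWidth (m name : String) (a b : Int) : String :=
  m ++ "." ++ name ++ ": width SV=" ++ PySem.Int.toStr a ++ " Chisel=" ++ PySem.Int.toStr b

-- ===== PORT A =====
def compare_modules (sv_ports : List (String × String × Int)) (chisel_ports : List (String × String × Int)) (module_name : String) : List String :=
  let svd := PySem.Dict.ofList sv_ports
  let chd := PySem.Dict.ofList chisel_ports
  let sv_names : PySem.Set String := PySem.Set.ofList svd.keys
  let ch_names : PySem.Set String := PySem.Set.ofList chd.keys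
  let only_sv := PySem.Set.diff (PySem.Set.diff sv_names ch_names) (PySem.Set.ofList ["reset"])
  let only_ch := PySem.Set.diff ch_names sv_names
  let errors : List String :=
    (if only_sv.isEmpty then [] else
      [msgOnlySV module_name (PySem.List.sorted only_sv (fun x => x) false)]) ++
    (if only_ch.isEmpty then [] else
      [msgOnlyCh module_name (PySem.List.sorted only_ch (fun x => x) false)])
  (PySem.List.sorted (PySem.Set.inter sv_names ch_names) (fun x => x) false).foldl
    (fun errors name =>
      let sv := svd.getD name ("", 0)
      let ch := chd.getD name ("", 0)
      let errors := if sv.1 ≠ ch.1 then errors ++ [msgDir module_name name sv.1 ch.1] else errors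
      if sv.2 ≠ ch.2 then
        if name = "io_lsbIns" ∧ sv.2 = ch.2 + 1 then errors
        else errors ++ [msgWidth module_name name sv.2 ch.2]
      else errors)
    errors

-- ===== PORT B =====
def altDetail (m name : String) (sv ch : String × Int) : List String :=
  (if sv.1 ≠ ch.1 then [msgDir m name sv.1 ch.1] else []) ++
  (if sv.2 ≠ ch.2 ∧ ¬(name = "io_lsbIns" ∧ sv.2 = ch.2 + 1) then [msgWidth m name sv.2 ch.2] else [])

def altStep (svd chd : PySem.Dict String (String × Int)) (m : String)
    (acc : List String × List String × List String) (name : String) :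
    List String × List String × List String :=
  match chd.get? name, svd.get? name with
  | none, _ => if name ≠ "reset" then (acc.1 ++ [name], acc.2.1, acc.2.2) else acc
  | some _, none => (acc.1, acc.2.1 ++ [name], acc.2.2)
  | some c, some s => (acc.1, acc.2.1, acc.2.2 ++ altDetail m name s c)

def compare_modules_alt (sv_ports : List (String × String × Int)) (chisel_ports : List (String × String × Int)) (module_name : String) : List String :=
  let svd := PySem.Dict.ofList sv_ports
  let chd := PySem.Dict.ofList chisel_ports
  let u := PySem.List.sorted
    (PySem.Set.union (PySem.Set.ofList svd.keys) (PySem.Set.ofList chd.keys)) (fun x => x) false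
  let r := u.foldl (altStep svd chd module_name) ([], [], [])
  (if r.1.isEmpty then [] else [msgOnlySV module_name r.1]) ++
  (if r.2.1.isEmpty then [] else [msgOnlyCh module_name r.2.1]) ++
  r.2.2

-- ===== PRECONDITION & SPEC =====
def Spec_compare_modules (sv_ports : List (String × String × Int)) (chisel_ports : List (String × String × Int)) (module_name : String) (out : List String) : Prop := out = compare_modules_alt sv_ports chisel_ports module_name
instance (sv_ports : List (String × String × Int)) (chisel_ports : List (String × String × Int)) (module_name : String) (out : List String) : Decidable (Spec_compare_modules sv_ports chisel_ports module_name out) := by unfold Spec_compare_modules; infer_instance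

-- ===== CLAIM (what is proved, stated in full; the proofs are below) =====
def Claim_equal_compare_modules : Prop := ∀ (sv_ports : List (String × String × Int)) (chisel_ports : List (String × String × Int)) (module_name : String), Dom_compare_modules sv_ports chisel_ports module_name → Spec_compare_modules sv_ports chisel_ports module_name (compare_modules sv_ports chisel_ports module_name)

-- ===== LEMMAS AND PROOFS =====

-- Bool classifiers and per-name emitters used to characterise the two loops.
def pSV (chd : PySem.Dict String (String × Int)) (n : String) : Bool :=
  decide (chd.get? n = none ∧ n ≠ "reset")

def pCH (svd chd : PySem.Dict String (String × Int)) (n : String) : Bool :=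
  decide (chd.get? n ≠ none ∧ svd.get? n = none)

def pBoth (svd chd : PySem.Dict String (String × Int)) (n : String) : Bool :=
  decide (chd.get? n ≠ none ∧ svd.get? n ≠ none)

def gB (svd chd : PySem.Dict String (String × Int)) (m n : String) : List String :=
  match chd.get? n, svd.get? n with
  | some c, some s => altDetail m n s c
  | _, _ => []

def gA (svd chd : PySem.Dict String (String × Int)) (m n : String) : List String :=
  (if (svd.getD n ("", 0)).1 ≠ (chd.getD n ("", 0)).1 then
      [msgDir m n (svd.getD n ("", 0)).1 (chd.getD n ("", 0)).1] else []) ++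
  (if (svd.getD n ("", 0)).2 ≠ (chd.getD n ("", 0)).2 then
      (if n = "io_lsbIns" ∧ (svd.getD n ("", 0)).2 = (chd.getD n ("", 0)).2 + 1 then []
       else [msgWidth m n (svd.getD n ("", 0)).2 (chd.getD n ("", 0)).2]) else [])

-- B's fold computes the three classified lists.
theorem foldB_eq (svd chd : PySem.Dict String (String × Int)) (m : String) :
    ∀ (l : List String) (a b c : List String),
      l.foldl (altStep svd chd m) (a, b, c) =
        (a ++ l.filter (pSV chd), b ++ l.filter (pCH svd chd), c ++ l.flatMap (gB svd chd m)) := by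
  intro l
  induction l with
  | nil => intro a b c; simp
  | cons n t ih =>
    intro a b c
    simp only [List.foldl_cons]
    by_cases hr : n = "reset"
    · subst hr
      rcases h1 : chd.get? "reset" with _ | cval <;> rcases h2 : svd.get? "reset" with _ | sval <;>
        simp [altStep, pSV, pCH, gB, h1, h2, ih, List.append_assoc]
    · rcases h1 : chd.get? n with _ | cval <;> rcases h2 : svd.get? n with _ | sval <;>
        simp [altStep, pSV, pCH, gB, h1, h2, hr, ih, List.append_assoc]

theorem flatMap_congr_mem {α β : Type} (l : List α) (f g : α → List β)
    (h : ∀ n ∈ l, f n = g n) : l.flatMap f = l.flatMap g := by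
  induction l with
  | nil => rfl
  | cons x t ih =>
    simp only [List.flatMap_cons, h x (by simp), ih (fun n hn => h n (by simp [hn]))]

theorem flatMap_eq_filter_flatMap {α β : Type} (l : List α) (g : α → List β) (p : α → Bool)
    (h : ∀ n, p n = false → g n = []) : l.flatMap g = (l.filter p).flatMap g := by
  induction l with
  | nil => rfl
  | cons x t ih =>
    by_cases hp : p x = true
    · simp [List.flatMap_cons, hp, ih]
    · simp only [Bool.not_eq_true] at hp
      simp [List.flatMap_cons, hp, h x hp, ih]

theorem pairwise_lt_of_le_nodup (l : List String) (h : l.Pairwise (· ≤ ·)) (hn : l.Nodup) :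
    l.Pairwise (· < ·) :=
  (h.and hn).imp (fun hab => lt_of_le_of_ne hab.1 hab.2)

-- sorted(S) is the filtered sorted union, whenever S is exactly {n ∈ U : p n}.
theorem sorted_eq_filter_of_mem_iff (U S : List String) (p : String → Bool)
    (hU : U.Pairwise (· < ·)) (hS : S.Nodup)
    (h : ∀ n, n ∈ S ↔ (n ∈ U ∧ p n = true)) :
    PySem.List.sorted S (fun x => x) false = U.filter p := by
  apply PySem.List.sorted_eq_of_perm_of_pairwise_lt
  · rw [List.perm_ext_iff_of_nodup ((hU.imp ne_of_lt).filter p) hS]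
    intro n
    rw [List.mem_filter, h n]
  · exact hU.filter p

-- A's loop (in zeta-normal form) appends gA per name.
theorem foldA_eq (svd chd : PySem.Dict String (String × Int)) (m : String) :
    ∀ (l : List String) (e : List String),
      List.foldl
        (fun errors name =>
        if (svd.getD name ("", 0)).2 ≠ (chd.getD name ("", 0)).2 then
          if name = "io_lsbIns" ∧ (svd.getD name ("", 0)).2 = (chd.getD name ("", 0)).2 + 1 then
            if (svd.getD name ("", 0)).1 ≠ (chd.getD name ("", 0)).1 then
              errors ++ [msgDir m name (svd.getD name ("", 0)).1 (chd.getD name ("", 0)).1]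
            else errors
          else
            (if (svd.getD name ("", 0)).1 ≠ (chd.getD name ("", 0)).1 then
                errors ++ [msgDir m name (svd.getD name ("", 0)).1 (chd.getD name ("", 0)).1]
              else errors) ++
              [msgWidth m name (svd.getD name ("", 0)).2 (chd.getD name ("", 0)).2]
        else
          if (svd.getD name ("", 0)).1 ≠ (chd.getD name ("", 0)).1 then
            errors ++ [msgDir m name (svd.getD name ("", 0)).1 (chd.getD name ("", 0)).1]
          else errors)
        e l = e ++ l.flatMap (gA svd chd m) := by
  intro l
  induction l with
  | nil => simp
  | cons n t ih =>
    intro e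
    rw [List.foldl_cons, ih]
    simp only [List.flatMap_cons, ← List.append_assoc]
    congr 1
    simp only [gA]
    split_ifs <;> simp [List.append_assoc]

theorem bodies_eq (svd chd : PySem.Dict String (String × Int)) (m : String)
    (hS : svd.keys.Nodup) (hC : chd.keys.Nodup) :
    ((if (PySem.Set.diff (PySem.Set.diff (PySem.Set.ofList svd.keys) (PySem.Set.ofList chd.keys)) (PySem.Set.ofList ["reset"])).isEmpty then [] else
      [msgOnlySV m (PySem.List.sorted (PySem.Set.diff (PySem.Set.diff (PySem.Set.ofList svd.keys) (PySem.Set.ofList chd.keys)) (PySem.Set.ofList ["reset"])) (fun x => x) false)]) ++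
     (if (PySem.Set.diff (PySem.Set.ofList chd.keys) (PySem.Set.ofList svd.keys)).isEmpty then [] else
      [msgOnlyCh m (PySem.List.sorted (PySem.Set.diff (PySem.Set.ofList chd.keys) (PySem.Set.ofList svd.keys)) (fun x => x) false)])
     |> (fun errors =>
       (PySem.List.sorted (PySem.Set.inter (PySem.Set.ofList svd.keys) (PySem.Set.ofList chd.keys)) (fun x => x) false).foldl
        (fun errors name =>
          let sv := svd.getD name ("", 0)
          let ch := chd.getD name ("", 0)
          let errors := if sv.1 ≠ ch.1 then errors ++ [msgDir m name sv.1 ch.1] else errors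
          if sv.2 ≠ ch.2 then
            if name = "io_lsbIns" ∧ sv.2 = ch.2 + 1 then errors
            else errors ++ [msgWidth m name sv.2 ch.2]
          else errors)
        errors))
    =
    (let u := PySem.List.sorted (PySem.Set.union (PySem.Set.ofList svd.keys) (PySem.Set.ofList chd.keys)) (fun x => x) false
     let r := u.foldl (altStep svd chd m) ([], [], [])
     (if r.1.isEmpty then [] else [msgOnlySV m r.1]) ++
     (if r.2.1.isEmpty then [] else [msgOnlyCh m r.2.1]) ++ r.2.2) := by
  have hRes : PySem.Set.ofList ["reset"] = ["reset"] := rfl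
  simp only [PySem.Set.ofList_eq_self_of_nodup _ hS, PySem.Set.ofList_eq_self_of_nodup _ hC, hRes]
  -- the sorted union and its strict order
  have hUnodup : (PySem.Set.union svd.keys chd.keys).Nodup := PySem.Set.nodup_union _ _ hS
  have hUlt : (PySem.List.sorted (PySem.Set.union svd.keys chd.keys) (fun x => x) false).Pairwise (· < ·) :=
    pairwise_lt_of_le_nodup _ (PySem.List.sorted_pairwise _ _)
      ((PySem.List.sorted_perm _ _ _).symm.nodup hUnodup)
  have hmemU : ∀ n, n ∈ PySem.List.sorted (PySem.Set.union svd.keys chd.keys) (fun x => x) false ↔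
      (n ∈ svd.keys ∨ n ∈ chd.keys) := by
    intro n; rw [PySem.List.mem_sorted, PySem.Set.mem_union]
  have hgetS : ∀ n, svd.get? n = none ↔ n ∉ svd.keys := fun n =>
    PySem.Dict.get?_eq_none_iff_not_mem_keys svd n
  have hgetC : ∀ n, chd.get? n = none ↔ n ∉ chd.keys := fun n =>
    PySem.Dict.get?_eq_none_iff_not_mem_keys chd n
  -- the three classified sublists of the sorted union
  have hOSV : PySem.List.sorted (PySem.Set.diff (PySem.Set.diff svd.keys chd.keys) ["reset"]) (fun x => x) false =
      (PySem.List.sorted (PySem.Set.union svd.keys chd.keys) (fun x => x) false).filter (pSV chd) := by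
    apply sorted_eq_filter_of_mem_iff _ _ _ hUlt (PySem.Set.nodup_diff _ _ (PySem.Set.nodup_diff _ _ hS))
    intro n
    simp only [PySem.Set.mem_diff, pSV, hmemU, hgetC n, decide_eq_true_eq, List.mem_singleton]
    tauto
  have hOCH : PySem.List.sorted (PySem.Set.diff chd.keys svd.keys) (fun x => x) false =
      (PySem.List.sorted (PySem.Set.union svd.keys chd.keys) (fun x => x) false).filter (pCH svd chd) := by
    apply sorted_eq_filter_of_mem_iff _ _ _ hUlt (PySem.Set.nodup_diff _ _ hC)
    intro n
    simp only [PySem.Set.mem_diff, pCH, hmemU, ne_eq, hgetS n, hgetC n, not_not, decide_eq_true_eq]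
    tauto
  have hINT : PySem.List.sorted (PySem.Set.inter svd.keys chd.keys) (fun x => x) false =
      (PySem.List.sorted (PySem.Set.union svd.keys chd.keys) (fun x => x) false).filter (pBoth svd chd) := by
    apply sorted_eq_filter_of_mem_iff _ _ _ hUlt (PySem.Set.nodup_inter _ _ hS)
    intro n
    simp only [PySem.Set.mem_inter, pBoth, hmemU, ne_eq, hgetS n, hgetC n, not_not, decide_eq_true_eq]
    tauto
  -- A's loop appends gA per name
  rw [foldA_eq svd chd m]
  -- the detail lists agree name by name on the intersection
  have hDET : (PySem.List.sorted (PySem.Set.inter svd.keys chd.keys) (fun x => x) false).flatMap (gA svd chd m) =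
      (PySem.List.sorted (PySem.Set.union svd.keys chd.keys) (fun x => x) false).flatMap (gB svd chd m) := by
    rw [hINT, flatMap_eq_filter_flatMap _ (gB svd chd m) (pBoth svd chd) ?van]
    case van =>
      intro n hn
      simp only [pBoth, decide_eq_false_iff_not, not_and_or, not_not] at hn
      rcases hn with hn | hn <;> simp [gB, hn]
    apply flatMap_congr_mem
    intro n hn
    rw [List.mem_filter] at hn
    have hb := hn.2
    simp only [pBoth, decide_eq_true_eq] at hb
    rcases hc : chd.get? n with _ | cval
    · exact absurd hc hb.1
    rcases hs : svd.get? n with _ | sval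
    · exact absurd hs hb.2
    simp only [gA, gB, hc, hs, altDetail, PySem.Dict.getD_eq_get?_getD, Option.getD_some]
    congr 1
    split_ifs <;> first | rfl | tauto
  -- B's loop computes the three lists
  rw [foldB_eq]
  -- emptiness tests agree
  have hempty : ∀ (l : List String), (PySem.List.sorted l (fun x => x) false).isEmpty = l.isEmpty := by
    intro l
    apply Bool.eq_iff_iff.mpr
    simp [List.isEmpty_iff, PySem.List.sorted_eq_nil_iff]
  simp only [List.nil_append]
  rw [← hOSV, ← hOCH, ← hDET, ← hempty (PySem.Set.diff (PySem.Set.diff svd.keys chd.keys) ["reset"]),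
    ← hempty (PySem.Set.diff chd.keys svd.keys)]

-- ===== VERDICT (by name: the statement is the Claim_ definition above) =====
theorem compare_modules_spec : Claim_equal_compare_modules := by
  intro sv_ports chisel_ports module_name _dom
  unfold Spec_compare_modules
  have h := bodies_eq (PySem.Dict.ofList sv_ports) (PySem.Dict.ofList chisel_ports) module_name
    (PySem.Dict.nodup_keys_ofList _) (PySem.Dict.nodup_keys_ofList _)
  simpa [compare_modules, compare_modules_alt] using h
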